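-- pv_equiv track=rewrite | github.com/teremterem/MiniAgents | miniagents/ext/markdown/chat_history_md.py | _grab_and_clean_up_lines
-- ===== SOURCE A (Python) =====
-- from typing import Optional, Union
--
-- def _grab_and_clean_up_lines(md_lines: list[str], start_line: int, end_line: Optional[int] = None) -> str:
--     """
--     Grab a snippet of the markdown content by start and end line numbers and clean it up (remove leading
--     and trailing empty lines).
--     """
--     if end_line is None:
--         end_line = len(md_lines)
--
--     content_lines = md_lines[start_line:end_line]
--
--     # remove leading and trailing empty lines (but keep the leading and trailing whitespaces of the
--     # non-empty lines)
--     while content_lines and not content_lines[0].strip():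
--         content_lines.pop(0)
--     while content_lines and not content_lines[-1].strip():
--         content_lines.pop()
--
--     if not content_lines:
--         # there is no content in this section
--         return ""
--
--     return "\n".join(content_lines)
-- ===== SOURCE B (Python) =====
-- def _grab_and_clean_up_lines(md_lines, start_line, end_line=None):
--     lines = md_lines[start_line:end_line]
--     n = len(lines)
--     i = 0
--     while i < n and not lines[i].strip():
--         i += 1
--     j = n
--     while j > i and not lines[j - 1].strip():
--         j -= 1
--     return "\n".join(lines[i:j])
-- ===== Notes on version B (the rewrite author's own statement) =====
-- stated objective: alternative
-- what changed: Instead of repeatedly popping blank lines from the front and back of the sliced list, B finds the first and last non-blank indices with two index scans and takes a single slice; this avoids pop(0)'s quadratic worst case, though a timing run on random inputs did not confirm a consistent speed-up.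
import Mathlib
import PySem

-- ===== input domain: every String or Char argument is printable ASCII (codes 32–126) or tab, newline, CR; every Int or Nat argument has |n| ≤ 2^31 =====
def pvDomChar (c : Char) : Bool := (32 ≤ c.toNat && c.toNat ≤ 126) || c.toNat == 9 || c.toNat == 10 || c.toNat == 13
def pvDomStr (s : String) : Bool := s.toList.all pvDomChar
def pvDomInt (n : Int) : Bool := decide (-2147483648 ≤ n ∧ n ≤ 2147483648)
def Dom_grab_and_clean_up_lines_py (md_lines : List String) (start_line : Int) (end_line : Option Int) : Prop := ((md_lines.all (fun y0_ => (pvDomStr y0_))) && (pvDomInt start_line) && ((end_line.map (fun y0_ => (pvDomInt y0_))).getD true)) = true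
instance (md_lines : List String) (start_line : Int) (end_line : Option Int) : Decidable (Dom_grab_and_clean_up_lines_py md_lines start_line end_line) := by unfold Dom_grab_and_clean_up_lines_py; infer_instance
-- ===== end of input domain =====

-- B replaces A's repeated pop(0)/pop() of blank lines by two index scans for the
-- first/last non-blank line and a single slice (alternative structure; no speed claim).


-- ===== PORT A =====
def pvBlank (s : String) : Bool := PySem.Str.strip s == ""

-- while content_lines and not content_lines[0].strip(): content_lines.pop(0)
def pvPopLead : List String → List String
  | [] => []
  | x :: xs => if pvBlank x then pvPopLead xs else x :: xs

-- while content_lines and not content_lines[-1].strip(): content_lines.pop()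
def pvPopTrail (l : List String) : List String :=
  match h : l.getLast? with
  | none => l
  | some x =>
    if pvBlank x then pvPopTrail l.dropLast else l
termination_by l.length
decreasing_by
  have : l ≠ [] := by intro hn; subst hn; simp at h
  simpa [List.length_dropLast] using Nat.sub_lt (List.length_pos_iff.mpr this) one_pos

def grab_and_clean_up_lines_py (md_lines : List String) (start_line : Int) (end_line : Option Int) : String :=
  let e : Int := end_line.getD (md_lines.length : Int)
  let content := PySem.List.slice md_lines (some start_line) (some e)
  let content := pvPopLead content
  let content := pvPopTrail content
  if content.isEmpty then ""
  else PySem.Str.join "\n" content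

-- ===== PORT B =====
-- i = 0; while i < n and not lines[i].strip(): i += 1
def pvScanFwd (lines : List String) (i : Nat) : Nat :=
  if _h : i < lines.length then
    if pvBlank (lines.getD i "") then pvScanFwd lines (i + 1) else i
  else i
termination_by lines.length - i

-- j = n; while j > i and not lines[j-1].strip(): j -= 1
def pvScanBack (lines : List String) (i : Nat) (j : Nat) : Nat :=
  if _h : i < j then
    if pvBlank (lines.getD (j - 1) "") then pvScanBack lines i (j - 1) else j
  else j
termination_by j

def grab_and_clean_up_lines_py_alt (md_lines : List String) (start_line : Int) (end_line : Option Int) : String :=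
  let lines := PySem.List.slice md_lines (some start_line) end_line
  let i := pvScanFwd lines 0
  let j := pvScanBack lines i lines.length
  PySem.Str.join "\n" (PySem.List.slice lines (some (i : Int)) (some (j : Int)))

-- ===== PRECONDITION & SPEC =====
def Spec_grab_and_clean_up_lines_py (md_lines : List String) (start_line : Int) (end_line : Option Int) (out : String) : Prop := out = grab_and_clean_up_lines_py_alt md_lines start_line end_line
instance (md_lines : List String) (start_line : Int) (end_line : Option Int) (out : String) : Decidable (Spec_grab_and_clean_up_lines_py md_lines start_line end_line out) := by unfold Spec_grab_and_clean_up_lines_py; infer_instance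

-- ===== CLAIM (what is proved, stated in full; the proofs are below) =====
def Claim_equal_grab_and_clean_up_lines_py : Prop := ∀ (md_lines : List String) (start_line : Int) (end_line : Option Int), Dom_grab_and_clean_up_lines_py md_lines start_line end_line → Spec_grab_and_clean_up_lines_py md_lines start_line end_line (grab_and_clean_up_lines_py md_lines start_line end_line)

-- ===== LEMMAS AND PROOFS =====

-- lines[a:len(lines)] = lines[a:] : the explicit end bound A substitutes for None is a no-op
lemma slice_some_len {α : Type} (xs : List α) (a : Int) :
    PySem.List.slice xs (some a) (some (xs.length : Int)) = PySem.List.slice xs (some a) none := by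
  simp [PySem.List.slice]

-- the front while-loop of A drops exactly the pvScanFwd-counted prefix
lemma popLead_eq_drop_scan (l : List String) (i : Nat) :
    pvPopLead (l.drop i) = l.drop (pvScanFwd l i) := by
  fun_induction pvScanFwd l i with
  | case1 i h hb ih =>
    rw [List.drop_eq_getElem_cons h]
    rw [List.getD_eq_getElem l "" h] at hb
    simpa [pvPopLead, hb] using ih
  | case2 i h hb =>
    rw [List.drop_eq_getElem_cons h]
    rw [List.getD_eq_getElem l "" h] at hb
    simp [pvPopLead, hb, ← List.drop_eq_getElem_cons h]
  | case3 i h =>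
    simp [pvPopLead, List.drop_eq_nil_of_le (by omega : l.length ≤ i)]

lemma scanFwd_le (l : List String) (i : Nat) : i ≤ pvScanFwd l i ∧ pvScanFwd l i ≤ max i l.length := by
  fun_induction pvScanFwd l i with
  | case1 i h hb ih => omega
  | case2 i h hb => omega
  | case3 i h => omega

lemma getLast?_take_drop (l : List String) (i j : Nat) (hij : i < j) (hj : j ≤ l.length) :
    ((l.drop i).take (j - i)).getLast? = some (l[j - 1]'(by omega)) := by
  rw [List.getLast?_eq_getElem?]
  have hlen : ((l.drop i).take (j - i)).length = j - i := by
    simp; omega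
  rw [hlen]
  rw [List.getElem?_take_of_lt (by omega)]
  rw [List.getElem?_drop]
  have hidx : i + (j - i - 1) = j - 1 := by omega
  rw [hidx]
  rw [List.getElem?_eq_getElem (by omega : j - 1 < l.length)]

-- the back while-loop of A truncates exactly to the pvScanBack index
lemma popTrail_eq_take_scan (l : List String) (i j : Nat) :
    i ≤ j → j ≤ l.length →
    pvPopTrail ((l.drop i).take (j - i)) = (l.drop i).take (pvScanBack l i j - i) := by
  fun_induction pvScanBack l i j with
  | case1 j h hb ih =>
    intro hij hj
    have hg := getLast?_take_drop l i j h (by omega)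
    rw [List.getD_eq_getElem l "" (by omega : j - 1 < l.length)] at hb
    rw [pvPopTrail, hg]
    simp only [hb, if_true]
    have hdl : ((l.drop i).take (j - i)).dropLast = (l.drop i).take (j - 1 - i) := by
      rw [List.dropLast_eq_take, List.take_take]
      have hlen : ((l.drop i).take (j - i)).length = j - i := by
        simp; omega
      rw [hlen]
      congr 1
      omega
    rw [hdl]
    exact ih (by omega) (by omega)
  | case2 j h hb =>
    intro hij hj
    have hg := getLast?_take_drop l i j h (by omega)
    rw [List.getD_eq_getElem l "" (by omega : j - 1 < l.length)] at hb
    rw [pvPopTrail, hg]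
    simp [hb]
  | case3 j h =>
    intro hij hj
    have : j = i := by omega
    subst this
    simp [pvPopTrail]

lemma join_nil_str : PySem.Str.join "\n" ([] : List String) = "" := by
  simp [PySem.Str.join, PySem.Chars.join_nil]

-- both cleanups of the same sliced list produce the same string
lemma core_eq (l : List String) :
    (if (pvPopTrail (pvPopLead l)).isEmpty then ""
     else PySem.Str.join "\n" (pvPopTrail (pvPopLead l)))
    = PySem.Str.join "\n"
        (PySem.List.slice l (some ((pvScanFwd l 0 : Nat) : Int))
          (some ((pvScanBack l (pvScanFwd l 0) l.length : Nat) : Int))) := by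
  set i := pvScanFwd l 0 with hi
  set j := pvScanBack l i l.length with hj
  have hile : i ≤ l.length := by
    have := scanFwd_le l 0
    omega
  have h1 : pvPopLead l = l.drop i := by
    simpa using popLead_eq_drop_scan l 0
  have h2 : pvPopTrail (l.drop i) = (l.drop i).take (j - i) := by
    have := popTrail_eq_take_scan l i l.length hile (le_refl _)
    rwa [List.take_of_length_le (by simp)] at this
  rw [h1, h2, PySem.List.slice_natCast]
  by_cases hnil : (l.drop i).take (j - i) = []
  · simp [hnil, join_nil_str]
  · simp [List.isEmpty_iff, hnil]

-- ===== VERDICT (by name: the statement is the Claim_ definition above) =====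
theorem grab_and_clean_up_lines_py_spec : Claim_equal_grab_and_clean_up_lines_py := by
  intro md_lines start_line end_line _hdom
  unfold Spec_grab_and_clean_up_lines_py grab_and_clean_up_lines_py grab_and_clean_up_lines_py_alt
  have hsl : PySem.List.slice md_lines (some start_line)
      (some (end_line.getD (md_lines.length : Int)))
      = PySem.List.slice md_lines (some start_line) end_line := by
    cases end_line with
    | none => exact slice_some_len md_lines start_line
    | some e => rfl
  simp only [hsl]
  exact core_eq _
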